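-- pv_equiv track=rewrite | github.com/rosacry/Mapperatorinator | calc_fid.py | calculate_rhythm_stats
-- ===== SOURCE A (Python) =====
-- def calculate_rhythm_stats(real_rhythm, generated_rhythm):
--     # Rhythm is a set of timestamps for each beat
--     # Calculate number of true positives, false positives, and false negatives within a leniency of 10 ms
--     leniency = 10
--     true_positives = 0
--     false_positives = 0
--     false_negatives = 0
--     for real_beat in real_rhythm:
--         if any(abs(real_beat - gen_beat) <= leniency for gen_beat in generated_rhythm):
--             true_positives += 1
--         else:
--             false_negatives += 1
--
--     for gen_beat in generated_rhythm:
--         if not any(abs(gen_beat - real_beat) <= leniency for real_beat in real_rhythm):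
--             false_positives += 1
--
--     return {
--         "true_positives": true_positives,
--         "false_positives": false_positives,
--         "false_negatives": false_negatives,
--     }
-- ===== SOURCE B (Python) =====
-- def calculate_rhythm_stats(real_rhythm, generated_rhythm):
--     # Sort each side once; per beat a binary search finds the first element
--     # >= beat - 10, so one comparison decides "any within 10 ms".
--     leniency = 10
--
--     def has_close(sorted_beats, beat):
--         lo, hi = 0, len(sorted_beats)
--         target = beat - leniency
--         while lo < hi:
--             mid = (lo + hi) // 2
--             if sorted_beats[mid] < target:
--                 lo = mid + 1
--             else:
--                 hi = mid
--         return lo < len(sorted_beats) and sorted_beats[lo] <= beat + leniency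
--
--     gen_sorted = sorted(generated_rhythm)
--     real_sorted = sorted(real_rhythm)
--
--     tp = 0
--     for r in real_rhythm:
--         if has_close(gen_sorted, r):
--             tp += 1
--     fp = 0
--     for g in generated_rhythm:
--         if not has_close(real_sorted, g):
--             fp += 1
--
--     return {
--         "true_positives": tp,
--         "false_positives": fp,
--         "false_negatives": len(real_rhythm) - tp,
--     }
-- ===== Notes on version B (the rewrite author's own statement) =====
-- stated objective: faster
-- what changed: Replaced the quadratic any(...) scan per beat by sorting each list once and answering each 'any beat within 10 ms?' query with a binary search; false negatives come from len(real)-tp instead of a second counter.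
import Mathlib
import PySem

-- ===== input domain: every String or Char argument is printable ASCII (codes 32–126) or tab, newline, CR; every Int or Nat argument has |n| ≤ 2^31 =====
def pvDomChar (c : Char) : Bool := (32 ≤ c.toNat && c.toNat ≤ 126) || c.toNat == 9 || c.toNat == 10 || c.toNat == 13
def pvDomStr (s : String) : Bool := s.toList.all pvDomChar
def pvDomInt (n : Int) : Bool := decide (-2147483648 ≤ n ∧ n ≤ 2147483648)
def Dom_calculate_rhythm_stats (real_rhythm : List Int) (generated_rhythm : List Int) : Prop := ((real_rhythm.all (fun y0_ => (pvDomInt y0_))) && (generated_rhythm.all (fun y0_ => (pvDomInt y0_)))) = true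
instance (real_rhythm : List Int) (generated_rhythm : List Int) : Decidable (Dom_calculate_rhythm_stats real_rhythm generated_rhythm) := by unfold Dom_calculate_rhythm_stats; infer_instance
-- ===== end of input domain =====

-- B replaces A's quadratic per-beat scans by sorting each list once and deciding each
-- "any beat within 10 ms?" query with a binary search (objective: faster, asymptotic).

-- ===== PORT A =====
def calculate_rhythm_stats (real_rhythm : List Int) (generated_rhythm : List Int) : List (String × Int) :=
  let leniency : Int := 10
  -- state (true_positives, false_positives, false_negatives); first loop over real_rhythm
  let s1 : Int × Int × Int := real_rhythm.foldl (fun (p : Int × Int × Int) real_beat =>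
    if generated_rhythm.any (fun gen_beat => decide (|real_beat - gen_beat| ≤ leniency))
    then (p.1 + 1, p.2.1, p.2.2) else (p.1, p.2.1, p.2.2 + 1)) (0, 0, 0)
  -- second loop over generated_rhythm
  let s2 : Int × Int × Int := generated_rhythm.foldl (fun (p : Int × Int × Int) gen_beat =>
    if !(real_rhythm.any (fun real_beat => decide (|gen_beat - real_beat| ≤ leniency)))
    then (p.1, p.2.1 + 1, p.2.2) else p) s1
  [("true_positives", s2.1), ("false_positives", s2.2.1), ("false_negatives", s2.2.2)]

-- ===== PORT B =====
-- Source B's hand-written binary search loop (lo/hi shrink; all reads are in range, so getD's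
-- default is never consulted — exact for Source B's sorted_beats[mid]).
def pvBsearch (xs : List Int) (target : Int) (lo hi : Nat) : Nat :=
  if _h : lo < hi then
    let mid := (lo + hi) / 2  -- Source B's (lo+hi)//2: on Nat, Lean's / is Python's // (nonnegative operands)
    if xs.getD mid 0 < target then pvBsearch xs target (mid + 1) hi
    else pvBsearch xs target lo mid
  else lo
termination_by hi - lo
decreasing_by all_goals omega

def pvHasClose (sorted_beats : List Int) (beat : Int) : Bool :=
  let lo := pvBsearch sorted_beats (beat - 10) 0 sorted_beats.length
  decide (lo < sorted_beats.length) && decide (sorted_beats.getD lo 0 ≤ beat + 10)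

def calculate_rhythm_stats_alt (real_rhythm : List Int) (generated_rhythm : List Int) : List (String × Int) :=
  let gen_sorted := PySem.List.sorted generated_rhythm (fun x => x) false
  let real_sorted := PySem.List.sorted real_rhythm (fun x => x) false
  let tp : Int := real_rhythm.foldl (fun (a : Int) r => if pvHasClose gen_sorted r then a + 1 else a) 0
  let fp : Int := generated_rhythm.foldl (fun (a : Int) g => if !pvHasClose real_sorted g then a + 1 else a) 0
  [("true_positives", tp), ("false_positives", fp), ("false_negatives", (real_rhythm.length : Int) - tp)]

-- ===== PRECONDITION & SPEC =====
def Spec_calculate_rhythm_stats (real_rhythm : List Int) (generated_rhythm : List Int) (out : List (String × Int)) : Prop := out = calculate_rhythm_stats_alt real_rhythm generated_rhythm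
instance (real_rhythm : List Int) (generated_rhythm : List Int) (out : List (String × Int)) : Decidable (Spec_calculate_rhythm_stats real_rhythm generated_rhythm out) := by unfold Spec_calculate_rhythm_stats; infer_instance

-- ===== CLAIM (what is proved, stated in full; the proofs are below) =====
def Claim_equal_calculate_rhythm_stats : Prop := ∀ (real_rhythm : List Int) (generated_rhythm : List Int), Dom_calculate_rhythm_stats real_rhythm generated_rhythm → Spec_calculate_rhythm_stats real_rhythm generated_rhythm (calculate_rhythm_stats real_rhythm generated_rhythm)

-- ===== LEMMAS AND PROOFS =====

-- pvBsearch on a (pointwise) monotone segment returns the first index ≥ target.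
theorem pvBsearch_spec (xs : List Int) (t : Int) (lo hi : Nat)
    (hmono : ∀ p q : Nat, p ≤ q → q < xs.length → xs.getD p 0 ≤ xs.getD q 0)
    (hhi : hi ≤ xs.length) (hlolehi : lo ≤ hi)
    (hpre : ∀ j, j < lo → xs.getD j 0 < t)
    (hpost : ∀ j, hi ≤ j → j < xs.length → t ≤ xs.getD j 0) :
    (∀ j, j < pvBsearch xs t lo hi → xs.getD j 0 < t) ∧
    (∀ j, pvBsearch xs t lo hi ≤ j → j < xs.length → t ≤ xs.getD j 0) ∧
    pvBsearch xs t lo hi ≤ hi := by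
  fun_induction pvBsearch xs t lo hi with
  | case1 lo hi h mid hlt ih =>
    have hmidhi : mid < hi := by simp only [mid]; omega
    obtain ⟨h1, h2, h3⟩ := ih hhi (by omega)
      (fun j hj => by
        by_cases hjm : j = mid
        · subst hjm; exact hlt
        · exact lt_of_le_of_lt (hmono j mid (by omega) (by omega)) hlt)
      hpost
    exact ⟨h1, h2, by omega⟩
  | case2 lo hi h mid hlt ih =>
    have hmidhi : mid < hi := by simp only [mid]; omega
    have hmidlen : mid < xs.length := by omega
    obtain ⟨h1, h2, h3⟩ := ih (by omega) (by simp only [mid]; omega) hpre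
      (fun j hj hjlen => le_trans (not_lt.mp hlt) (hmono mid j hj hjlen))
    exact ⟨h1, h2, by omega⟩
  | case3 lo hi h =>
    refine ⟨hpre, fun j hj hjlen => hpost j (by omega) hjlen, hlolehi⟩

theorem pvHasClose_eq_any (xs : List Int) (x : Int)
    (hmono : ∀ p q : Nat, p ≤ q → q < xs.length → xs.getD p 0 ≤ xs.getD q 0) :
    pvHasClose xs x = xs.any (fun y => decide (|x - y| ≤ 10)) := by
  obtain ⟨h1, h2, h3⟩ := pvBsearch_spec xs (x - 10) 0 xs.length hmono le_rfl (Nat.zero_le _)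
    (fun j hj => absurd hj (Nat.not_lt_zero j)) (fun j hj hjlen => absurd hjlen (by omega))
  set i := pvBsearch xs (x - 10) 0 xs.length with hi
  rw [Bool.eq_iff_iff]
  simp only [pvHasClose, ← hi, Bool.and_eq_true, decide_eq_true_eq, List.any_eq_true]
  constructor
  · rintro ⟨hlen, hle⟩
    refine ⟨xs.getD i 0, ?_, ?_⟩
    · rw [List.getD_eq_getElem _ _ hlen]; exact xs.getElem_mem hlen
    · have := h2 i le_rfl hlen
      rw [abs_le]; omega
  · rintro ⟨y, hy, hyc⟩
    rw [abs_le] at hyc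
    obtain ⟨j, hjlen, hjy⟩ := List.mem_iff_getElem.mp hy
    have hjD : xs.getD j 0 = y := by rw [List.getD_eq_getElem _ _ hjlen, hjy]
    have hij : i ≤ j := by
      by_contra hc
      have := h1 j (by omega)
      omega
    have hilen : i < xs.length := by omega
    refine ⟨hilen, ?_⟩
    have := hmono i j hij hjlen
    omega

-- instance of the above for PySem's sorted output
theorem sorted_mono (l : List Int) :
    ∀ p q : Nat, p ≤ q → q < (PySem.List.sorted l (fun x => x) false).length →
      (PySem.List.sorted l (fun x => x) false).getD p 0 ≤ (PySem.List.sorted l (fun x => x) false).getD q 0 := by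
  intro p q hpq hq
  have hp : p < (PySem.List.sorted l (fun x => x) false).length := lt_of_le_of_lt hpq hq
  rw [List.getD_eq_getElem _ _ hp, List.getD_eq_getElem _ _ hq]
  exact PySem.List.sorted_id_getElem_mono (xs := l) hpq hq

theorem hasClose_sorted (l : List Int) (x : Int) :
    pvHasClose (PySem.List.sorted l (fun y => y) false) x = l.any (fun y => decide (|x - y| ≤ 10)) := by
  rw [pvHasClose_eq_any _ _ (sorted_mono l)]
  rw [Bool.eq_iff_iff]
  simp only [List.any_eq_true, PySem.List.mem_sorted]

-- A's first loop: triple fold counts matches and misses.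
theorem foldA1 (c : Int → Bool) (l : List Int) : ∀ a b d : Int,
    l.foldl (fun (p : Int × Int × Int) r =>
      if c r then (p.1 + 1, p.2.1, p.2.2) else (p.1, p.2.1, p.2.2 + 1)) (a, b, d)
    = (a + (l.countP c : Int), b, d + ((l.length : Int) - l.countP c)) := by
  induction l with
  | nil => intro a b d; simp
  | cons x xs ih =>
    intro a b d
    rw [List.foldl_cons]
    by_cases hx : c x
    · rw [if_pos hx, ih]
      simp [hx, Prod.ext_iff]
      omega
    · rw [if_neg hx, ih]
      simp [hx, Prod.ext_iff]
      omega

-- A's second loop: only the middle component changes.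
theorem foldA2 (c : Int → Bool) (l : List Int) : ∀ a b d : Int,
    l.foldl (fun (p : Int × Int × Int) g =>
      if !(c g) then (p.1, p.2.1 + 1, p.2.2) else p) (a, b, d)
    = (a, b + (l.countP (fun g => !(c g)) : Int), d) := by
  induction l with
  | nil => intro a b d; simp
  | cons x xs ih =>
    intro a b d
    rw [List.foldl_cons]
    by_cases hx : c x
    · rw [if_neg (by simp [hx]), ih]
      simp [hx]
    · rw [if_pos (by simp [hx]), ih]
      simp [hx]
      omega

-- B's counting loop.
theorem foldB (c : Int → Bool) (l : List Int) : ∀ a : Int,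
    l.foldl (fun (a : Int) r => if c r then a + 1 else a) a = a + (l.countP c : Int) := by
  induction l with
  | nil => intro a; simp
  | cons x xs ih =>
    intro a
    rw [List.foldl_cons]
    by_cases hx : c x
    · rw [if_pos hx, ih]
      simp [hx]
      omega
    · rw [if_neg hx, ih]
      simp [hx]

-- ===== VERDICT (by name: the statement is the Claim_ definition above) =====
theorem calculate_rhythm_stats_spec : Claim_equal_calculate_rhythm_stats := by
  intro rr gr _
  unfold Spec_calculate_rhythm_stats calculate_rhythm_stats calculate_rhythm_stats_alt
  simp only [foldA1, foldA2, foldB, zero_add]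
  have e1 : rr.countP (fun r => pvHasClose (PySem.List.sorted gr (fun x => x) false) r)
      = rr.countP (fun r => gr.any (fun g => decide (|r - g| ≤ 10))) :=
    List.countP_congr (fun x _ => by rw [hasClose_sorted gr x])
  have e2 : gr.countP (fun g => !(pvHasClose (PySem.List.sorted rr (fun x => x) false) g))
      = gr.countP (fun g => !(rr.any (fun r => decide (|g - r| ≤ 10)))) :=
    List.countP_congr (fun x _ => by rw [hasClose_sorted rr x])
  rw [e1, e2]
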